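-- pv_equiv track=rewrite | github.com/KevinMagron/tdde23 | lab3/lab3.py | nearest_piece
-- ===== SOURCE A (Python) =====
-- def nearest_piece(board,x,y):
--     sum = 1000000
--     for i in board:
--         if (abs(x - i[0]) + abs(y - i[1])) < sum:
--             sum = (abs(x - i[0]) + abs(y - i[1]))
--     if sum == 1000000:
--         return False
--     else:
--         for i in board:
--             if (abs(x - i[0]) + abs(y - i[1])) == sum:
--                 return i
-- ===== SOURCE B (Python) =====
-- def nearest_piece(board, x, y):
--     if not board:
--         return None
--     return sorted(board, key=lambda p: abs(x - p[0]) + abs(y - p[1]))[0]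
-- ===== Notes on version B (the rewrite author's own statement) =====
-- stated objective: simpler
-- what changed: Replaces A's two scans (sentinel-initialised minimum search, then a re-scan for the first piece at that distance) with a stable sort by Manhattan distance and taking the first element; Pre_ excludes boards (empty or with every piece at distance >= 1000000) on which A returns the bool False instead of a piece.
-- outside the precondition, e.g. on nearest_piece([], 0, 0): A returns False, B returns None; on nearest_piece([(2000000, 0)], 0, 0): A returns False, B returns (2000000, 0)
import Mathlib
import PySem

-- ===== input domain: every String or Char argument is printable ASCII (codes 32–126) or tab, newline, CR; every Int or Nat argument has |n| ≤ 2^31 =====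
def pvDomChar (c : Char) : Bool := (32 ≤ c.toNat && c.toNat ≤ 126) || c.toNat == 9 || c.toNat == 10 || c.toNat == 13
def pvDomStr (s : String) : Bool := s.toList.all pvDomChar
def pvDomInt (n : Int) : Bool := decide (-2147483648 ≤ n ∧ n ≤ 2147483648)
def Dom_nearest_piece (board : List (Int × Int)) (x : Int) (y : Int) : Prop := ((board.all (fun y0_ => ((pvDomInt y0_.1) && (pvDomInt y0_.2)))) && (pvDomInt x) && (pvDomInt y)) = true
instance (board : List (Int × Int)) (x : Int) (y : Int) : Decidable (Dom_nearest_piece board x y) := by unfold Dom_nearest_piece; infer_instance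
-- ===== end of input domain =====

-- B replaces A's two scans (sentinel minimum search + re-scan) by a stable sort by Manhattan
-- distance followed by taking the first element (simpler shape, same result on Pre_).

-- ===== PORT A =====
-- A's second loop: return the first piece whose distance equals the minimum found
def nearestFind (board : List (Int × Int)) (x : Int) (y : Int) (s : Int) : Option (Int × Int) :=
  match board with
  | [] => none
  | i :: rest => if |x - i.1| + |y - i.2| = s then some i else nearestFind rest x y s

def nearest_piece (board : List (Int × Int)) (x : Int) (y : Int) : Option (Int × Int) :=
  let sum := board.foldl (fun s i => if |x - i.1| + |y - i.2| < s then |x - i.1| + |y - i.2| else s) 1000000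
  if sum = 1000000 then none
  else nearestFind board x y sum

-- ===== PORT B =====
def nearest_piece_alt (board : List (Int × Int)) (x : Int) (y : Int) : Option (Int × Int) :=
  if board.isEmpty then none
  else (PySem.List.sorted board (fun p => |x - p.1| + |y - p.2|) false).head?

-- ===== PRECONDITION & SPEC =====
-- Pre_ excludes inputs on which every piece is at Manhattan distance ≥ 1000000 (including the empty
-- board): there A returns the sentinel False, which is not a value of the declared Optional type.
def Pre_nearest_piece (board : List (Int × Int)) (x : Int) (y : Int) : Prop :=
  ∃ p ∈ board, |x - p.1| + |y - p.2| < 1000000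
instance (board : List (Int × Int)) (x : Int) (y : Int) : Decidable (Pre_nearest_piece board x y) := by
  unfold Pre_nearest_piece; infer_instance

def pvWitness_nearest_piece : (List (Int × Int)) × Int × Int := ([(1, 1), (0, 2)], 0, 0)

def Spec_nearest_piece (board : List (Int × Int)) (x : Int) (y : Int) (out : Option (Int × Int)) : Prop := out = nearest_piece_alt board x y
instance (board : List (Int × Int)) (x : Int) (y : Int) (out : Option (Int × Int)) : Decidable (Spec_nearest_piece board x y out) := by unfold Spec_nearest_piece; infer_instance

-- ===== CLAIM =====
def Claim_equal_nearest_piece : Prop := ∀ (board : List (Int × Int)) (x : Int) (y : Int), Dom_nearest_piece board x y → Pre_nearest_piece board x y → Spec_nearest_piece board x y (nearest_piece board x y)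

-- ===== LEMMAS AND PROOFS =====

-- A's strict-< update is the running minimum
theorem foldA_eq_foldmin {α : Type} (key : α → Int) (xs : List α) (c : Int) :
    xs.foldl (fun s i => if key i < s then key i else s) c = xs.foldl (fun s i => min s (key i)) c := by
  induction xs generalizing c with
  | nil => rfl
  | cons a t ih =>
      simp only [List.foldl_cons]
      rw [ih]
      congr 1
      rw [min_def]
      split_ifs <;> omega

theorem fmin_le_init {α : Type} (key : α → Int) (xs : List α) (c : Int) :
    xs.foldl (fun s i => min s (key i)) c ≤ c := by
  induction xs generalizing c with
  | nil => simp
  | cons a t ih =>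
      simp only [List.foldl_cons]
      exact le_trans (ih (min c (key a))) (min_le_left _ _)

theorem fmin_le_mem {α : Type} (key : α → Int) (xs : List α) (c : Int) :
    ∀ i ∈ xs, xs.foldl (fun s i => min s (key i)) c ≤ key i := by
  induction xs generalizing c with
  | nil => intro i h; simp at h
  | cons a t ih =>
      intro i hi
      simp only [List.foldl_cons]
      rcases List.mem_cons.mp hi with h | h
      · subst h
        exact le_trans (fmin_le_init key t _) (min_le_right _ _)
      · exact ih _ i h

-- min distributes over the fold's initial value
theorem fmin_min_init {α : Type} (key : α → Int) (t : List α) (c d : Int) :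
    t.foldl (fun s i => min s (key i)) (min c d) = min c (t.foldl (fun s i => min s (key i)) d) := by
  induction t generalizing d with
  | nil => rfl
  | cons a t ih =>
      simp only [List.foldl_cons, min_assoc]
      exact ih (min d (key a))

-- the first-strict-min scan keeps the FIRST element of (m0 :: t) with minimal key
theorem scan_eq_find {α : Type} (key : α → Int) (t : List α) (m0 : α) :
    t.foldl (fun acc x => match acc with | none => some x | some m => if key x < key m then some x else some m) (some m0)
      = List.find? (fun i => key i == t.foldl (fun s i => min s (key i)) (key m0)) (m0 :: t) := by
  induction t generalizing m0 with
  | nil => simp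
  | cons a t ih =>
      simp only [List.foldl_cons]
      have hstep : (if key a < key m0 then some a else some m0)
          = some (if key a < key m0 then a else m0) := by split_ifs <;> rfl
      rw [hstep, ih]
      have hkey : key (if key a < key m0 then a else m0) = min (key m0) (key a) := by
        rw [min_def]; split_ifs <;> omega
      rw [hkey]
      set K := t.foldl (fun s i => min s (key i)) (min (key m0) (key a)) with hK
      have hKle : K ≤ min (key m0) (key a) := fmin_le_init key t _
      by_cases hlt : key a < key m0
      · have hm0 : ¬ (key m0 == K) = true := by
          simp only [beq_iff_eq]
          intro h
          have := le_trans hKle (min_le_right (key m0) (key a))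
          omega
        simp only [Bool.not_eq_true] at hm0
        simp [List.find?_cons, hlt, hm0]
      · simp only [hlt, if_false]
        by_cases hm0 : (key m0 == K) = true
        · simp [hm0]
        · have ha : ¬ (key a == K) = true := by
            simp only [beq_iff_eq] at hm0 ⊢
            intro h
            have h1 := le_trans hKle (min_le_left (key m0) (key a))
            omega
          simp [hm0, ha]

-- head of a stable insertion step only compares against the current head
theorem head?_insertBy {α : Type} (key : α → Int) (x : α) (ys : List α) :
    (PySem.List.insertBy (fun a b => decide (key a < key b)) x ys).head?
      = match ys.head? with
        | none => some x
        | some m => if key x < key m then some x else some m := by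
  cases ys with
  | nil => rfl
  | cons y t =>
      simp only [PySem.List.insertBy, List.head?_cons]
      split_ifs with h <;> simp_all

-- head of the insertion-sort fold is the first-strict-min scan
theorem head?_foldl_insertBy {α : Type} (key : α → Int) (t : List α) (acc : List α) :
    (t.foldl (fun a x => PySem.List.insertBy (fun a b => decide (key a < key b)) x a) acc).head?
      = t.foldl (fun h x => match h with | none => some x | some m => if key x < key m then some x else some m) acc.head? := by
  induction t generalizing acc with
  | nil => rfl
  | cons a t ih =>
      simp only [List.foldl_cons]
      rw [ih, head?_insertBy]

theorem nearestFind_eq_find? (board : List (Int × Int)) (x y s : Int) :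
    nearestFind board x y s = List.find? (fun i => |x - i.1| + |y - i.2| == s) board := by
  induction board with
  | nil => rfl
  | cons a t ih =>
      by_cases h : |x - a.1| + |y - a.2| = s
      · simp [nearestFind, h]
      · simp [nearestFind, h, ih]

-- ===== VERDICT =====
theorem nearest_piece_spec : Claim_equal_nearest_piece := by
  intro board x y _ hPre
  unfold Spec_nearest_piece nearest_piece nearest_piece_alt
  obtain ⟨p, hp, hkp⟩ := hPre
  set key : Int × Int → Int := fun p => |x - p.1| + |y - p.2| with hkeydef
  obtain ⟨c0, t, rfl⟩ := List.exists_cons_of_ne_nil (List.ne_nil_of_mem hp)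
  -- A's first pass computes the true minimum of the keys
  have hfold : (c0 :: t).foldl (fun s i => if |x - i.1| + |y - i.2| < s then |x - i.1| + |y - i.2| else s) 1000000
      = (c0 :: t).foldl (fun s i => min s (key i)) 1000000 := foldA_eq_foldmin key _ 1000000
  set M := t.foldl (fun s i => min s (key i)) (key c0) with hM
  have hMlt : M < 1000000 := by
    have : M ≤ key p := by
      rcases List.mem_cons.mp hp with h | h
      · subst h; exact fmin_le_init key t _
      · exact fmin_le_mem key t (key c0) p h
    simp only [hkeydef] at this
    omega
  have hs : (c0 :: t).foldl (fun s i => min s (key i)) 1000000 = M := by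
    have h1 : (c0 :: t).foldl (fun s i => min s (key i)) 1000000
        = t.foldl (fun s i => min s (key i)) (min 1000000 (key c0)) := by
      simp [List.foldl_cons]
    rw [h1, fmin_min_init key t 1000000 (key c0), ← hM]
    omega
  have hMne : ¬ (M = 1000000) := by omega
  simp only [hfold, hs, if_neg hMne, List.isEmpty_cons, Bool.false_eq_true, if_false]
  rw [nearestFind_eq_find?]
  -- B: head of stable sort = first element with minimal key
  have hB : (PySem.List.sorted (c0 :: t) key false).head?
      = List.find? (fun i => key i == M) (c0 :: t) := by
    rw [PySem.List.sorted_eq_foldl_insertBy, head?_foldl_insertBy key]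
    simp only [List.foldl_cons, List.head?_nil]
    rw [scan_eq_find key t c0, hM]
  rw [hB]
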